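-- pv_equiv track=rewrite | github.com/zeynepgurler/CMPE561-Application-Project-1 | tokenizer/utils.py | tokens_to_spans
-- ===== SOURCE A (Python) =====
-- from typing import Set, Tuple, List
-- from typing import List, Set, Tuple
--
-- def build_text_and_boundaries_from_tokens(tokens: List[str]) -> Tuple[str, Set[int]]:
--     """
--     Reconstruct a raw text from gold tokens and compute the gold token boundaries.
--
--     Example:
--         tokens = ["Hello", ",", "world", "!"]
--         text = "Hello , world !"
--         boundaries = {5, 7, 13, 15}
--         (i.e., indices where a token ends in the reconstructed string)
--
--     For tokenization training, we deliberately use a simple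
--     "tokens + space" scheme so the mapping between characters
--     and token boundaries is deterministic and consistent across domains.
--     """
--     text_parts: List[str] = []
--     boundaries: Set[int] = set()
--     pos = 0
--
--     for i, tok in enumerate(tokens):
--         if i > 0:
--             text_parts.append(" ")
--             pos += 1  # space
--         text_parts.append(tok)
--         pos += len(tok)
--         boundaries.add(pos)  # token ends at this character index
--
--     text = "".join(text_parts)
--     return text, boundaries
--
-- def tokens_to_spans(tokens: List[str]) -> Tuple[str, List[Tuple[int, int]]]:
--     """
--     Convert a gold token list to character spans over the reconstructed text.
--
--     Returns:
--         text  : reconstructed string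
--         spans : list of (start, end) indices for each token
--     """
--     text, _ = build_text_and_boundaries_from_tokens(tokens)
--     spans: List[Tuple[int, int]] = []
--     pos = 0
--
--     for i, tok in enumerate(tokens):
--         if i > 0:
--             pos += 1  # space
--         start = pos
--         end = start + len(tok)
--         spans.append((start, end))
--         pos = end
--
--     return text, spans
-- ===== SOURCE B (Python) =====
-- def tokens_to_spans(tokens):
--     text = " ".join(tokens)
--     spans = []
--     end = len(text)
--     for tok in reversed(tokens):
--         spans.append((end - len(tok), end))
--         end -= len(tok) + 1
--     spans.reverse()
--     return text, spans
-- ===== Notes on version B (the rewrite author's own statement) =====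
-- stated objective: faster
-- what changed: Reconstructs the text with a single " ".join and builds the spans BACK-TO-FRONT: starting from the total text length it walks the tokens in reverse, emitting each span from its end offset, then reverses the list - replacing A's boundary-building helper pass plus forward pos-tracking loop (constant-factor: one C-level join instead of a per-token part list and a second tracking loop).
import Mathlib
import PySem

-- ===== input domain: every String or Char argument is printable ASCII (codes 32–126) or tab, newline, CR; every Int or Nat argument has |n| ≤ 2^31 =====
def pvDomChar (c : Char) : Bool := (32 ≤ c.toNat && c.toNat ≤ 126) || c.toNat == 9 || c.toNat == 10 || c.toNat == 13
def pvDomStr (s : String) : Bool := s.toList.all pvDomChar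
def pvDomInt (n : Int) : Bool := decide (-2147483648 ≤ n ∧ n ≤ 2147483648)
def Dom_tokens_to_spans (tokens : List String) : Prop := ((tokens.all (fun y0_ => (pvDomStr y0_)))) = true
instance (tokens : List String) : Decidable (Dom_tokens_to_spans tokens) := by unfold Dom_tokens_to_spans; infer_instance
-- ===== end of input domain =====

-- B reconstructs the text with one " ".join and builds the spans back-to-front from the
-- total text length, reversing at the end, instead of A's helper pass + forward pos loop (objective: alternative).


-- ===== PORT A =====
-- loop of build_text_and_boundaries_from_tokens: state (parts, boundaries, pos), index i
def pvA_textLoop : List String → Int → Int → List String → PySem.Set Int → (List String × PySem.Set Int)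
  | [], _, _, parts, bnd => (parts, bnd)
  | tok :: rest, i, pos, parts, bnd =>
      let parts1 := if i > 0 then parts ++ [" "] else parts
      let pos1 := if i > 0 then pos + 1 else pos
      let parts2 := parts1 ++ [tok]
      let pos2 := pos1 + PySem.Str.len tok
      pvA_textLoop rest (i + 1) pos2 parts2 (bnd.add pos2)

def pvA_build (tokens : List String) : String × PySem.Set Int :=
  let r := pvA_textLoop tokens 0 0 [] (PySem.Set.ofList [])
  (PySem.Str.join "" r.1, r.2)

-- the span loop of tokens_to_spans: state (spans, pos), index i
def pvA_spanLoop : List String → Int → Int → List (Int × Int) → List (Int × Int)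
  | [], _, _, spans => spans
  | tok :: rest, i, pos, spans =>
      let pos1 := if i > 0 then pos + 1 else pos
      let start := pos1
      let e := start + PySem.Str.len tok
      pvA_spanLoop rest (i + 1) e (spans ++ [(start, e)])

def tokens_to_spans (tokens : List String) : String × (List (Int × Int)) :=
  ((pvA_build tokens).1, pvA_spanLoop tokens 0 0 [])

-- ===== PORT B =====
-- the backward loop: for tok in reversed(tokens): append (end-len, end); end -= len+1
def pvB_backLoop : List String → Int → List (Int × Int) → List (Int × Int)
  | [], _, spans => spans
  | tok :: rest, e, spans =>
      pvB_backLoop rest (e - (PySem.Str.len tok + 1)) (spans ++ [(e - PySem.Str.len tok, e)])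

def tokens_to_spans_alt (tokens : List String) : String × (List (Int × Int)) :=
  let text := PySem.Str.join " " tokens
  (text, (pvB_backLoop tokens.reverse (PySem.Str.len text) []).reverse)

-- ===== PRECONDITION & SPEC =====
def Spec_tokens_to_spans (tokens : List String) (out : String × (List (Int × Int))) : Prop := out = tokens_to_spans_alt tokens
instance (tokens : List String) (out : String × (List (Int × Int))) : Decidable (Spec_tokens_to_spans tokens out) := by unfold Spec_tokens_to_spans; infer_instance

-- ===== CLAIM =====
def Claim_equal_tokens_to_spans : Prop := ∀ (tokens : List String), Dom_tokens_to_spans tokens → Spec_tokens_to_spans tokens (tokens_to_spans tokens)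

-- ===== LEMMAS AND PROOFS =====

-- forward span specification: token starting at s spans (s, s+len), next starts at s+len+1
def pvSpec : Int → List String → List (Int × Int)
  | _, [] => []
  | s, t :: ts => (s, s + PySem.Str.len t) :: pvSpec (s + PySem.Str.len t + 1) ts

-- total weight: Σ (len t + 1)
def pvW (ts : List String) : Int := (ts.map (fun t => PySem.Str.len t + 1)).sum

theorem pvW_cons (t : String) (ts : List String) :
    pvW (t :: ts) = PySem.Str.len t + 1 + pvW ts := by
  simp [pvW]

theorem pvW_reverse (ts : List String) : pvW ts.reverse = pvW ts := by
  simp [pvW]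

-- A's text loop, once past the first token, appends " "+token for each remaining token
theorem pvA_textLoop_parts (ts : List String) : ∀ (i pos : Int) (parts : List String)
    (bnd : PySem.Set Int), 0 < i →
    (pvA_textLoop ts i pos parts bnd).1 = parts ++ ts.flatMap (fun t => [" ", t]) := by
  induction ts with
  | nil => intro i pos parts bnd _; simp [pvA_textLoop]
  | cons t ts ih =>
      intro i pos parts bnd hi
      simp only [pvA_textLoop, if_pos hi]
      rw [ih (i + 1) _ _ _ (by omega)]
      simp

-- joining with "" a list interleaved with " " equals joining the original with " "
theorem join_empty_interleave (t : List Char) (ts : List (List Char)) :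
    PySem.Chars.join [] (t :: ts.flatMap (fun u => [[' '], u]))
      = PySem.Chars.join [' '] (t :: ts) := by
  induction ts generalizing t with
  | nil => simp [PySem.Chars.join, List.intercalate]
  | cons u us ih =>
      simp only [List.flatMap_cons]
      rw [show t :: ([[' '], u] ++ us.flatMap (fun u => [[' '], u]))
            = t :: [' '] :: (u :: us.flatMap (fun u => [[' '], u])) by simp]
      rw [PySem.Chars.join_cons_cons, PySem.Chars.join_cons_cons, ih u,
        PySem.Chars.join_cons_cons]
      simp

-- the reconstructed text of a nonempty list has length pvW - 1
theorem len_join_space (t : String) (ts : List String) :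
    PySem.Str.len (PySem.Str.join " " (t :: ts)) = pvW (t :: ts) - 1 := by
  induction ts generalizing t with
  | nil =>
      simp [PySem.Str.len, PySem.Str.join, PySem.Chars.join,
        List.intercalate, pvW]
  | cons u us ih =>
      have h1 : (PySem.Str.join " " (t :: u :: us)).toList
          = t.toList ++ ' ' :: (PySem.Str.join " " (u :: us)).toList := by
        rw [PySem.Str.toList_join, PySem.Str.toList_join]
        simp only [List.map_cons]
        rw [PySem.Chars.join_cons_cons]
        simp
      have h2 := ih u
      simp only [PySem.Str.len_eq] at *
      rw [h1]
      rw [pvW_cons]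
      simp at h2 ⊢
      omega

-- A's span loop past the first token realises the forward specification
theorem pvA_spanLoop_eq (ts : List String) : ∀ (i pos : Int) (spans : List (Int × Int)), 0 < i →
    pvA_spanLoop ts i pos spans = spans ++ pvSpec (pos + 1) ts := by
  induction ts with
  | nil => intro i pos spans _; simp [pvA_spanLoop, pvSpec]
  | cons t ts ih =>
      intro i pos spans hi
      simp only [pvA_spanLoop, if_pos hi]
      rw [ih (i + 1) _ _ (by omega)]
      simp [pvSpec, List.append_assoc]

-- B's backward loop just accumulates on the right
theorem pvB_backLoop_acc (rs : List String) : ∀ (e : Int) (spans : List (Int × Int)),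
    pvB_backLoop rs e spans = spans ++ pvB_backLoop rs e [] := by
  induction rs with
  | nil => intro e spans; simp [pvB_backLoop]
  | cons t rs ih =>
      intro e spans
      simp only [pvB_backLoop]
      rw [ih _ (spans ++ _), ih _ ([] ++ _)]
      simp

-- appending one more (earliest) token to the backward loop's input
theorem pvB_backLoop_append (rs : List String) : ∀ (t : String) (e : Int),
    pvB_backLoop (rs ++ [t]) e []
      = pvB_backLoop rs e [] ++ [(e - pvW rs - PySem.Str.len t, e - pvW rs)] := by
  induction rs with
  | nil => intro t e; simp [pvB_backLoop, pvW]
  | cons r rs ih =>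
      intro t e
      simp only [List.cons_append, pvB_backLoop, List.nil_append]
      rw [pvB_backLoop_acc (rs ++ [t]),
        pvB_backLoop_acc rs (e - (PySem.Str.len r + 1)) [(e - PySem.Str.len r, e)], ih, pvW_cons]
      simp
      ring

-- reversing the backward loop's output gives the forward specification
theorem pvB_back_rev (ts : List String) : ∀ (e : Int),
    (pvB_backLoop ts.reverse e []).reverse = pvSpec (e - pvW ts + 1) ts := by
  induction ts with
  | nil => intro e; simp [pvB_backLoop, pvSpec]
  | cons t ts ih =>
      intro e
      rw [List.reverse_cons, pvB_backLoop_append, pvW_reverse]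
      rw [List.reverse_append, ih]
      simp only [pvSpec, pvW_cons, List.reverse_cons, List.reverse_nil, List.nil_append,
        List.singleton_append]
      rw [show e - (PySem.Str.len t + 1 + pvW ts) + 1 = e - pvW ts - PySem.Str.len t by ring]
      rw [show e - pvW ts - PySem.Str.len t + PySem.Str.len t = e - pvW ts by ring]

-- ===== VERDICT =====
theorem tokens_to_spans_spec : Claim_equal_tokens_to_spans := by
  intro tokens _
  show tokens_to_spans tokens = tokens_to_spans_alt tokens
  cases tokens with
  | nil => decide
  | cons t ts =>
      unfold tokens_to_spans tokens_to_spans_alt pvA_build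
      refine Prod.ext ?_ ?_
      · show PySem.Str.join "" (pvA_textLoop (t :: ts) 0 0 [] (PySem.Set.ofList [])).1 = _
        have h1 : (pvA_textLoop (t :: ts) 0 0 [] (PySem.Set.ofList [])).1
            = [t] ++ ts.flatMap (fun u => [" ", u]) := by
          simp only [pvA_textLoop]
          norm_num
          rw [pvA_textLoop_parts ts 1 _ _ _ (by omega)]
          simp
        rw [h1]
        apply String.ext
        rw [PySem.Str.toList_join, PySem.Str.toList_join]
        have h2 : (([t] ++ ts.flatMap fun u => [" ", u]).map String.toList)
            = t.toList :: (ts.map String.toList).flatMap (fun u => [[' '], u]) := by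
          simp [List.map_flatMap, List.flatMap_map]
        rw [h2]
        have := join_empty_interleave t.toList (ts.map String.toList)
        simpa using this
      · show pvA_spanLoop (t :: ts) 0 0 []
            = (pvB_backLoop (t :: ts).reverse
                (PySem.Str.len (PySem.Str.join " " (t :: ts))) []).reverse
        rw [pvB_back_rev (t :: ts) (PySem.Str.len (PySem.Str.join " " (t :: ts)))]
        rw [len_join_space]
        rw [show pvW (t :: ts) - 1 - pvW (t :: ts) + 1 = 0 by ring]
        simp only [pvA_spanLoop]
        norm_num
        rw [pvA_spanLoop_eq ts 1 _ _ (by omega)]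
        simp [pvSpec]
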